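-- pv_equiv track=rewrite | github.com/filipa131/KiSM | VigenereCipherDecoder.py | find_probable_key_length
-- ===== SOURCE A (Python) =====
-- def find_probable_key_length(repeat_sequences):
--     distances = []
--     for positions in repeat_sequences.values():
--         for i in range(len(positions) - 1):
--             for j in range(i + 1, len(positions)):
--                 distances.append(positions[j] - positions[i])
--
--     probable_lengths = set()
--     for distance in distances:
--         for factor in range(2, distance + 1):
--             if distance % factor == 0:
--                 probable_lengths.add(factor)
--
--     return list(probable_lengths)
-- ===== SOURCE B (Python) =====
-- def _divisors_from_2(distance):
--     # all divisors >= 2 of distance, in increasing order (trial division up to sqrt)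
--     small = []
--     large = []
--     f = 2
--     while f * f <= distance:
--         if distance % f == 0:
--             small.append(f)
--             c = distance // f
--             if c != f:
--                 large.append(c)
--         f += 1
--     if distance >= 2:
--         return small + large[::-1] + [distance]
--     return small
--
--
-- def find_probable_key_length(repeat_sequences):
--     probable_lengths = set()
--     for positions in repeat_sequences.values():
--         for i, p in enumerate(positions):
--             for q in positions[i + 1:]:
--                 probable_lengths.update(_divisors_from_2(q - p))
--     return list(probable_lengths)
-- ===== Notes on version B (the rewrite author's own statement) =====
-- stated objective: faster
-- what changed: B finds each distance's divisors by trial division up to sqrt(distance) (recording divisor and cofactor) instead of testing every factor from 2 to distance, and fuses the distance collection with the divisor pass instead of materialising a distances list.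
import Mathlib
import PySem

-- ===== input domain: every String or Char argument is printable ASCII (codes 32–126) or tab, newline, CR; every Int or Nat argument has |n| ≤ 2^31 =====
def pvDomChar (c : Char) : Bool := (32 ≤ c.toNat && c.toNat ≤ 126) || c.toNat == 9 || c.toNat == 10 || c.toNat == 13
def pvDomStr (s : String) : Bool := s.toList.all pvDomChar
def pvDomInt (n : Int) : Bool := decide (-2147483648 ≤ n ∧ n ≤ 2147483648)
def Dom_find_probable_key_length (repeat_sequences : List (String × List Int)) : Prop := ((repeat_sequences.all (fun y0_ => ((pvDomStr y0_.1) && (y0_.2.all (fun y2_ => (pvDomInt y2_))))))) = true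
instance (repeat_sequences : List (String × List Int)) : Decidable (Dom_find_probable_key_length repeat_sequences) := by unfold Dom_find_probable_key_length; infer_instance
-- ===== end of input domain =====

-- B replaces A's factor scan from 2 to distance by trial division up to sqrt(distance) and fuses the
-- distance collection with the divisor pass (objective: faster). Python A returns list(set(...)); the
-- ports return the set's insertion-order list (output compared as a set).

-- ===== PORT A =====
def find_probable_key_length (repeat_sequences : List (String × List Int)) : List Int :=
  -- distances = []; for positions in repeat_sequences.values(): for i …: for j …: distances.append(...)
  let distances : List Int := repeat_sequences.foldl (fun acc kv =>
    (PySem.List.pyRange 0 (PySem.List.len kv.2 - 1) 1).foldl (fun acc i =>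
      (PySem.List.pyRange (i + 1) (PySem.List.len kv.2) 1).foldl (fun acc j =>
        acc ++ [PySem.List.pyGetD kv.2 j 0 - PySem.List.pyGetD kv.2 i 0]) acc) acc) []
  -- probable_lengths = set(); for distance in distances: for factor in range(2, distance+1): if distance % factor == 0: add
  let probable_lengths : PySem.Set Int := distances.foldl (fun s distance =>
    (PySem.List.pyRange 2 (distance + 1) 1).foldl (fun s factor =>
      if PySem.Int.mod distance factor == 0 then PySem.Set.add s factor else s) s) PySem.Set.empty
  probable_lengths

-- ===== PORT B =====
-- while f * f <= distance: … f += 1   (f kept as a Nat counter starting at 2; the fuel argument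
-- only makes the loop structurally recursive and is never exhausted before the guard fails)
def pvTrial (distance : Int) : Nat → Nat → List Int → List Int → List Int
  | 0, _, small, large =>
    if 2 ≤ distance then small ++ large.reverse ++ [distance] else small
  | fuel + 1, f, small, large =>
    if (f : Int) * (f : Int) ≤ distance then
      if PySem.Int.mod distance (f : Int) == 0 then
        pvTrial distance fuel (f + 1) (small ++ [(f : Int)])
          (if PySem.Int.floordiv distance (f : Int) ≠ (f : Int) then
            large ++ [PySem.Int.floordiv distance (f : Int)] else large)
      else pvTrial distance fuel (f + 1) small large
    else
      if 2 ≤ distance then small ++ large.reverse ++ [distance] else small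

def pvDivisorsFrom2 (distance : Int) : List Int := pvTrial distance (distance.toNat + 1) 2 [] []

def find_probable_key_length_alt (repeat_sequences : List (String × List Int)) : List Int :=
  repeat_sequences.foldl (fun s kv =>
    (PySem.List.enumerate kv.2 0).foldl (fun s ip =>
      (PySem.List.slice kv.2 (some (ip.1 + 1)) none).foldl (fun s q =>
        PySem.Set.update s (pvDivisorsFrom2 (q - ip.2))) s) s) PySem.Set.empty

-- ===== PRECONDITION & SPEC =====
def Spec_find_probable_key_length (repeat_sequences : List (String × List Int)) (out : List Int) : Prop := out = find_probable_key_length_alt repeat_sequences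
instance (repeat_sequences : List (String × List Int)) (out : List Int) : Decidable (Spec_find_probable_key_length repeat_sequences out) := by unfold Spec_find_probable_key_length; infer_instance

-- ===== CLAIM (what is proved, stated in full; the proofs are below) =====
def Claim_equal_find_probable_key_length : Prop := ∀ (repeat_sequences : List (String × List Int)), Dom_find_probable_key_length repeat_sequences → Spec_find_probable_key_length repeat_sequences (find_probable_key_length repeat_sequences)

-- ===== LEMMAS AND PROOFS =====

-- A's divisor stream for one distance: every factor in [2, d] that divides d, in increasing order
def pvDivSeq (d : Int) : List Int :=
  (PySem.List.pyRange 2 (d + 1) 1).filter (fun f => PySem.Int.mod d f == 0)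

-- A's per-positions distance stream
def pvDA (ps : List Int) : List Int :=
  (PySem.List.pyRange 0 (PySem.List.len ps - 1) 1).flatMap (fun i =>
    (PySem.List.pyRange (i + 1) (PySem.List.len ps) 1).map (fun j =>
      PySem.List.pyGetD ps j 0 - PySem.List.pyGetD ps i 0))

-- B's per-positions distance stream
def pvDBdist (ps : List Int) : List Int :=
  (PySem.List.enumerate ps 0).flatMap (fun ip =>
    (PySem.List.slice ps (some (ip.1 + 1)) none).map (fun q => q - ip.2))

-- B's per-positions divisor stream
def pvDBdiv (ps : List Int) : List Int :=
  (PySem.List.enumerate ps 0).flatMap (fun ip =>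
    (PySem.List.slice ps (some (ip.1 + 1)) none).flatMap (fun q =>
      pvDivisorsFrom2 (q - ip.2)))

-- the small divisors (≥ 2, ≤ √d) still to be found from trial value f on
def pvSm (d : Int) (f : Nat) : List Int :=
  ((List.range' f (Nat.sqrt d.toNat + 1 - f)).map (fun (g : Nat) => (g : Int))).filter
    (fun g => PySem.Int.mod d g == 0)

-- their cofactors, in the order the loop appends them
def pvCg (d : Int) (f : Nat) : List Int :=
  ((pvSm d f).filter (fun g => decide (PySem.Int.floordiv d g ≠ g))).map
    (fun g => PySem.Int.floordiv d g)

theorem pv_foldl_if_add (p : Int → Bool) : ∀ (l : List Int) (s : PySem.Set Int),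
    l.foldl (fun s x => if p x then PySem.Set.add s x else s) s = PySem.Set.update s (l.filter p) := by
  intro l
  induction l with
  | nil => intro s; rfl
  | cons x xs ih =>
    intro s
    by_cases h : p x
    · simpa [h, PySem.Set.update] using ih (PySem.Set.add s x)
    · simpa [h, PySem.Set.update] using ih s

theorem pv_foldl_update {α : Type} (g : α → List Int) : ∀ (l : List α) (s : PySem.Set Int),
    l.foldl (fun s x => PySem.Set.update s (g x)) s = PySem.Set.update s (l.flatMap g) := by
  intro l
  induction l with
  | nil => intro s; rfl
  | cons x xs ih =>
    intro s
    rw [List.foldl_cons, ih, List.flatMap_cons]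
    show PySem.Set.update _ _ = (g x ++ xs.flatMap g).foldl PySem.Set.add s
    rw [List.foldl_append]
    rfl

theorem pv_flatMap_map {α β : Type} (l : List α) (f : α → β) (g : β → List Int) :
    (l.map f).flatMap g = l.flatMap (fun x => g (f x)) := by
  induction l with
  | nil => rfl
  | cons x xs ih => simp [ih]

theorem pv_guard_iff (d : Int) (hd : 0 ≤ d) (f : Nat) :
    ((f : Int) * (f : Int) ≤ d) ↔ f ≤ Nat.sqrt d.toNat := by
  rw [Nat.le_sqrt]
  have hc : ((f * f : Nat) : Int) = (f : Int) * (f : Int) := by push_cast; ring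
  omega

theorem pv_trial_eq (d : Int) (hd : 2 ≤ d) : ∀ (fuel f : Nat), Nat.sqrt d.toNat + 1 - f ≤ fuel →
    1 ≤ f → ∀ (small large : List Int),
    pvTrial d fuel f small large =
      small ++ pvSm d f ++ (pvCg d f).reverse ++ large.reverse ++ [d] := by
  intro fuel
  induction fuel with
  | zero =>
    intro f hk hf small large
    have hcnt : Nat.sqrt d.toNat + 1 - f = 0 := by omega
    rw [pvTrial, if_pos hd]
    simp [pvSm, pvCg, hcnt]
  | succ fuel ih =>
    intro f hk hf small large
    by_cases hfr : f ≤ Nat.sqrt d.toNat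
    · have hg : (f : Int) * (f : Int) ≤ d := (pv_guard_iff d (by omega) f).2 hfr
      have hrange : List.range' f (Nat.sqrt d.toNat + 1 - f) =
          f :: List.range' (f + 1) (Nat.sqrt d.toNat + 1 - (f + 1)) := by
        have h1 : Nat.sqrt d.toNat + 1 - f = (Nat.sqrt d.toNat + 1 - (f + 1)) + 1 := by omega
        rw [h1, List.range'_succ]
      rw [pvTrial, if_pos hg]
      by_cases hm : (PySem.Int.mod d (f : Int) == 0) = true
      · rw [if_pos hm, ih (f + 1) (by omega) (by omega)]
        by_cases hc : PySem.Int.floordiv d (f : Int) ≠ (f : Int)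
        · rw [if_pos hc]
          simp [pvSm, pvCg, hrange, hm, hc]
        · rw [if_neg hc]
          simp [pvSm, pvCg, hrange, hm, hc]
      · rw [if_neg hm, ih (f + 1) (by omega) (by omega)]
        simp [pvSm, pvCg, hrange, hm]
    · have hg : ¬ ((f : Int) * (f : Int) ≤ d) := by
        rw [pv_guard_iff d (by omega) f]; omega
      have hcnt : Nat.sqrt d.toNat + 1 - f = 0 := by omega
      rw [pvTrial, if_neg hg, if_pos hd]
      simp [pvSm, pvCg, hcnt]

-- cofactor facts for a divisor g ≥ 2 of d ≥ 2
theorem pv_cof (d : Int) (hd : 2 ≤ d) (g : Int) (hg2 : 2 ≤ g) (hdvd : g ∣ d) :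
    PySem.Int.floordiv d g * g = d ∧ 0 < PySem.Int.floordiv d g ∧
      PySem.Int.floordiv d g ∣ d ∧ PySem.Int.floordiv d g < d := by
  have hgpos : (0 : Int) < g := by omega
  rw [PySem.Int.floordiv_eq_ediv_of_pos hgpos]
  have hcg : d / g * g = d := Int.ediv_mul_cancel hdvd
  have hcpos : 0 < d / g := by nlinarith
  exact ⟨hcg, hcpos, ⟨g, hcg.symm⟩, by nlinarith⟩

theorem pv_sqrt_facts (d : Int) (hd : 2 ≤ d) :
    ((Nat.sqrt d.toNat : Int)) * ((Nat.sqrt d.toNat : Int)) ≤ d ∧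
      d < ((Nat.sqrt d.toNat : Int) + 1) * ((Nat.sqrt d.toNat : Int) + 1) ∧
      1 ≤ Nat.sqrt d.toNat ∧ ((Nat.sqrt d.toNat : Int)) < d := by
  set r := Nat.sqrt d.toNat with hrdef
  have h1 : r * r ≤ d.toNat := by have := Nat.sqrt_le' d.toNat; rw [pow_two] at this; omega
  have h2 : d.toNat < (r + 1) * (r + 1) := by
    have := Nat.lt_succ_sqrt' d.toNat; rw [pow_two] at this; omega
  have hc1 : ((r * r : Nat) : Int) = (r : Int) * (r : Int) := by push_cast; ring
  have hc2 : (((r + 1) * (r + 1) : Nat) : Int) = ((r : Int) + 1) * ((r : Int) + 1) := by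
    push_cast; ring
  have hr1 : 1 ≤ r := Nat.le_sqrt.2 (by omega)
  have hrr : (r : Int) * (r : Int) ≤ d := by omega
  have hlt : d < ((r : Int) + 1) * ((r : Int) + 1) := by omega
  refine ⟨hrr, hlt, hr1, ?_⟩
  have h3 : (1 : Int) ≤ (r : Int) := by exact_mod_cast hr1
  nlinarith

theorem pv_mem_divSeq (d a : Int) : a ∈ pvDivSeq d ↔ 2 ≤ a ∧ a ≤ d ∧ a ∣ d := by
  simp only [pvDivSeq, List.mem_filter, PySem.List.mem_pyRange_one, beq_iff_eq,
    PySem.Int.mod_eq_zero_iff_dvd]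
  exact ⟨fun ⟨⟨h1, h2⟩, h3⟩ => ⟨h1, by omega, h3⟩, fun ⟨h1, h2, h3⟩ => ⟨⟨h1, by omega⟩, h3⟩⟩

theorem pv_mem_Sm (d : Int) (hd : 2 ≤ d) (a : Int) :
    a ∈ pvSm d 2 ↔ 2 ≤ a ∧ a ≤ (Nat.sqrt d.toNat : Int) ∧ a ∣ d := by
  have hr1 : 1 ≤ Nat.sqrt d.toNat := (pv_sqrt_facts d hd).2.2.1
  unfold pvSm
  rw [List.mem_filter]
  constructor
  · rintro ⟨hm, hp⟩
    rw [List.mem_map] at hm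
    obtain ⟨g, hgm, rfl⟩ := hm
    rw [List.mem_range'_1] at hgm
    rw [beq_iff_eq, PySem.Int.mod_eq_zero_iff_dvd] at hp
    obtain ⟨hg1, hg2⟩ := hgm
    exact ⟨by exact_mod_cast hg1, by omega, hp⟩
  · rintro ⟨h2, hr, hdvd⟩
    refine ⟨List.mem_map.2 ⟨a.toNat, ?_, ?_⟩, ?_⟩
    · rw [List.mem_range'_1]
      omega
    · omega
    · rw [beq_iff_eq, PySem.Int.mod_eq_zero_iff_dvd]
      exact hdvd

theorem pv_div_eq (d : Int) : pvDivisorsFrom2 d = pvDivSeq d := by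
  by_cases hd : 2 ≤ d
  · -- trial division result, then identify the two sorted duplicate-free divisor lists
    obtain ⟨hrr, hlt, hr1, hrd⟩ := pv_sqrt_facts d hd
    set r := Nat.sqrt d.toNat with hrdef
    have hY : pvDivisorsFrom2 d = pvSm d 2 ++ (pvCg d 2).reverse ++ [d] := by
      rw [pvDivisorsFrom2, pv_trial_eq d hd _ 2 (by omega) (by omega)]
      simp
    -- every recorded cofactor lies strictly between √d and d
    have hCgBig : ∀ c ∈ pvCg d 2, (r : Int) < c ∧ c < d := by
      intro c hc
      simp only [pvCg, List.mem_map, List.mem_filter, decide_eq_true_eq] at hc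
      obtain ⟨g, ⟨hg, hne⟩, rfl⟩ := hc
      rw [pv_mem_Sm d hd g] at hg
      obtain ⟨hg2, hgr, hdvd⟩ := hg
      obtain ⟨hcg, hcpos, _, hcltd⟩ := pv_cof d hd g hg2 hdvd
      refine ⟨?_, hcltd⟩
      by_contra hle
      rw [not_lt] at hle
      have heq : d = (r : Int) * (r : Int) := by
        have h5 : PySem.Int.floordiv d g * g ≤ (r : Int) * (r : Int) :=
          mul_le_mul hle hgr (by omega) (by exact_mod_cast Nat.zero_le r)
        omega
      apply hne
      have hg_eq : g = (r : Int) := by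
        refine le_antisymm hgr ?_
        nlinarith [mul_le_mul_of_nonneg_right hle (by omega : (0 : Int) ≤ g)]
      have : PySem.Int.floordiv d g * g = (r : Int) * (r : Int) := by omega
      rw [hg_eq] at this ⊢
      have hrne : (r : Int) ≠ 0 := by omega
      exact mul_right_cancel₀ hrne this
    -- membership of the trial-division list
    have hmemY : ∀ a : Int,
        (a ∈ pvSm d 2 ++ (pvCg d 2).reverse ++ [d]) ↔ (2 ≤ a ∧ a ≤ d ∧ a ∣ d) := by
      intro a
      simp only [List.mem_append, List.mem_reverse, List.mem_singleton]
      constructor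
      · rintro ((ha | hc) | haEq)
        · rw [pv_mem_Sm d hd a] at ha
          exact ⟨ha.1, by omega, ha.2.2⟩
        · obtain ⟨hc1, hc2⟩ := hCgBig a hc
          simp only [pvCg, List.mem_map, List.mem_filter, decide_eq_true_eq] at hc
          obtain ⟨g, ⟨hg, _⟩, rfl⟩ := hc
          rw [pv_mem_Sm d hd g] at hg
          obtain ⟨_, _, hcd, _⟩ := pv_cof d hd g hg.1 hg.2.2
          exact ⟨by omega, by omega, hcd⟩
        · rw [haEq]
          exact ⟨hd, le_refl d, dvd_refl d⟩
      · rintro ⟨ha2, had, hdvd⟩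
        by_cases hsm : a ≤ (r : Int)
        · left; left
          exact (pv_mem_Sm d hd a).2 ⟨ha2, hsm, hdvd⟩
        · by_cases hlast : a = d
          · right; exact hlast
          · left; right
            -- a is a large divisor: its cofactor q = d / a is the small witness
            have hapos : (0 : Int) < a := by omega
            have hqa : d / a * a = d := Int.ediv_mul_cancel hdvd
            set q := d / a with hqdef
            have hq1 : 1 ≤ q := by nlinarith
            have hq2 : 2 ≤ q := by
              rcases eq_or_lt_of_le hq1 with h | h
              · exfalso; apply hlast; rw [← h, one_mul] at hqa; exact hqa
              · omega
            have ha_r : (r : Int) + 1 ≤ a := by omega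
            have hqr : q ≤ (r : Int) := by nlinarith
            have hd_eq : d = q * a := by linarith [hqa]
            have hfq : PySem.Int.floordiv d q = a := by
              rw [PySem.Int.floordiv_eq_ediv_of_pos (by omega : (0:Int) < q)]
              rw [hd_eq, Int.mul_ediv_cancel_left a (by omega : q ≠ 0)]
            simp only [pvCg, List.mem_map, List.mem_filter, decide_eq_true_eq]
            refine ⟨q, ⟨(pv_mem_Sm d hd q).2 ⟨hq2, hqr, ⟨a, hd_eq⟩⟩, ?_⟩, hfq⟩
            rw [hfq]
            omega
      -- end hmemY
    -- the trial-division list is strictly increasing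
    have hrangePw : (List.range' 2 (Nat.sqrt d.toNat + 1 - 2)).Pairwise (· < ·) :=
      List.pairwise_lt_range' 1 Nat.one_pos
    have hSmPw : (pvSm d 2).Pairwise (· < ·) := by
      unfold pvSm
      refine List.Pairwise.filter _ ?_
      rw [List.pairwise_map]
      exact hrangePw.imp (fun h => by exact_mod_cast h)
    have hCgPw : (pvCg d 2).reverse.Pairwise (· < ·) := by
      rw [List.pairwise_reverse]
      unfold pvCg
      rw [List.pairwise_map]
      have h1 : ((pvSm d 2).filter
          (fun g => decide (PySem.Int.floordiv d g ≠ g))).Pairwise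
          (fun a b => a ∈ pvSm d 2 ∧ b ∈ pvSm d 2 ∧ a < b) :=
        (List.Pairwise.and_mem.mp hSmPw).filter _
      refine h1.imp ?_
      rintro g1 g2 ⟨hm1, hm2, hlt12⟩
      rw [pv_mem_Sm d hd g1] at hm1
      rw [pv_mem_Sm d hd g2] at hm2
      obtain ⟨h12, h1r, h1d⟩ := hm1
      obtain ⟨h22, h2r, h2d⟩ := hm2
      obtain ⟨hc1, hp1, _, _⟩ := pv_cof d hd g1 h12 h1d
      obtain ⟨hc2, hp2, _, _⟩ := pv_cof d hd g2 h22 h2d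
      show PySem.Int.floordiv d g2 < PySem.Int.floordiv d g1
      nlinarith
    have hYPw : (pvSm d 2 ++ (pvCg d 2).reverse ++ [d]).Pairwise (· < ·) := by
      rw [List.pairwise_append, List.pairwise_append]
      refine ⟨⟨hSmPw, hCgPw, ?_⟩, List.pairwise_singleton _ _, ?_⟩
      · intro a ha b hb
        rw [List.mem_reverse] at hb
        obtain ⟨hb1, _⟩ := hCgBig b hb
        rw [pv_mem_Sm d hd a] at ha
        omega
      · intro a ha b hb
        rw [List.mem_singleton] at hb
        rw [hb]
        rcases List.mem_append.1 ha with ha | ha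
        · rw [pv_mem_Sm d hd a] at ha
          omega
        · rw [List.mem_reverse] at ha
          exact (hCgBig a ha).2
    -- A's stream is strictly increasing too, with the same members
    have hXPw : (pvDivSeq d).Pairwise (· < ·) :=
      (PySem.List.pairwise_lt_pyRange_one 2 (d + 1)).filter _
    have hndX : (pvDivSeq d).Nodup := hXPw.imp (fun h => ne_of_lt h)
    have hndY : (pvSm d 2 ++ (pvCg d 2).reverse ++ [d]).Nodup := hYPw.imp (fun h => ne_of_lt h)
    have hperm : (pvSm d 2 ++ (pvCg d 2).reverse ++ [d]).Perm (pvDivSeq d) := by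
      rw [List.perm_ext_iff_of_nodup hndY hndX]
      intro a
      rw [hmemY a, pv_mem_divSeq]
    have h1 : PySem.List.sorted (pvDivSeq d) (fun x => x) =
        pvSm d 2 ++ (pvCg d 2).reverse ++ [d] :=
      PySem.List.sorted_eq_of_perm_of_pairwise_lt _ _ _ hperm hYPw
    have h2 : PySem.List.sorted (pvDivSeq d) (fun x => x) = pvDivSeq d :=
      PySem.List.sorted_eq_of_perm_of_pairwise_lt _ _ _ (List.Perm.refl _) hXPw
    rw [hY, ← h1]
    exact h2
  · -- d ≤ 1: no factor at all on either side
    have h4 : ¬ (((2 : Nat) : Int) * ((2 : Nat) : Int) ≤ d) := by push_cast; omega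
    unfold pvDivisorsFrom2 pvDivSeq
    rw [pvTrial, if_neg h4, if_neg hd, PySem.List.pyRange_one_eq_nil (by omega)]
    rfl

theorem pv_A_eq (rs : List (String × List Int)) :
    find_probable_key_length rs =
      PySem.Set.update PySem.Set.empty ((rs.flatMap (fun kv => pvDA kv.2)).flatMap pvDivSeq) := by
  unfold find_probable_key_length
  have hdist : rs.foldl (fun acc kv =>
      (PySem.List.pyRange 0 (PySem.List.len kv.2 - 1) 1).foldl (fun acc i =>
        (PySem.List.pyRange (i + 1) (PySem.List.len kv.2) 1).foldl (fun acc j =>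
          acc ++ [PySem.List.pyGetD kv.2 j 0 - PySem.List.pyGetD kv.2 i 0]) acc) acc) [] =
      rs.flatMap (fun kv => pvDA kv.2) := by
    have h1 : (fun (acc : List Int) (kv : String × List Int) =>
        (PySem.List.pyRange 0 (PySem.List.len kv.2 - 1) 1).foldl (fun acc i =>
          (PySem.List.pyRange (i + 1) (PySem.List.len kv.2) 1).foldl (fun acc j =>
            acc ++ [PySem.List.pyGetD kv.2 j 0 - PySem.List.pyGetD kv.2 i 0]) acc) acc) =
        (fun acc kv => acc ++ pvDA kv.2) := by
      funext acc kv
      have hj : (fun (acc : List Int) (i : Int) =>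
          (PySem.List.pyRange (i + 1) (PySem.List.len kv.2) 1).foldl (fun acc j =>
            acc ++ [PySem.List.pyGetD kv.2 j 0 - PySem.List.pyGetD kv.2 i 0]) acc) =
          (fun acc i => acc ++ (PySem.List.pyRange (i + 1) (PySem.List.len kv.2) 1).map
            (fun j => PySem.List.pyGetD kv.2 j 0 - PySem.List.pyGetD kv.2 i 0)) := by
        funext acc i
        exact PySem.List.foldl_append_singleton_eq_map _ _ _
      rw [hj]
      exact PySem.List.foldl_append_eq_flatMap _ _ _
    rw [h1, PySem.List.foldl_append_eq_flatMap]
    rfl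
  rw [hdist]
  have h2 : (fun (s : PySem.Set Int) (dd : Int) =>
      (PySem.List.pyRange 2 (dd + 1) 1).foldl (fun s factor =>
        if PySem.Int.mod dd factor == 0 then PySem.Set.add s factor else s) s) =
      (fun s dd => PySem.Set.update s (pvDivSeq dd)) := by
    funext s dd
    exact pv_foldl_if_add _ _ s
  rw [h2]
  exact pv_foldl_update _ _ _

theorem pv_B_eq (rs : List (String × List Int)) :
    find_probable_key_length_alt rs =
      PySem.Set.update PySem.Set.empty (rs.flatMap (fun kv => pvDBdiv kv.2)) := by
  unfold find_probable_key_length_alt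
  have h2 : (fun (s : PySem.Set Int) (kv : String × List Int) =>
      (PySem.List.enumerate kv.2 0).foldl (fun s ip =>
        (PySem.List.slice kv.2 (some (ip.1 + 1)) none).foldl (fun s q =>
          PySem.Set.update s (pvDivisorsFrom2 (q - ip.2))) s) s) =
      (fun s kv => PySem.Set.update s (pvDBdiv kv.2)) := by
    funext s kv
    have h1 : (fun (s : PySem.Set Int) (ip : Int × Int) =>
        (PySem.List.slice kv.2 (some (ip.1 + 1)) none).foldl (fun s q =>
          PySem.Set.update s (pvDivisorsFrom2 (q - ip.2))) s) =
        (fun s ip => PySem.Set.update s ((PySem.List.slice kv.2 (some (ip.1 + 1)) none).flatMap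
          (fun q => pvDivisorsFrom2 (q - ip.2)))) := by
      funext s ip
      exact pv_foldl_update _ _ s
    rw [h1]
    exact pv_foldl_update _ _ s
  rw [h2]
  exact pv_foldl_update _ _ _

theorem pv_dist_eq (ps : List Int) : pvDA ps = pvDBdist ps := by
  unfold pvDA pvDBdist
  rw [PySem.List.enumerate_eq_map_pyRange ps (0 : Int), pv_flatMap_map]
  simp only [PySem.List.len_eq]
  by_cases h0 : ps.length = 0
  · rw [h0]
    rw [PySem.List.pyRange_one_eq_nil (by norm_num), PySem.List.pyRange_one_eq_nil (by norm_num)]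
    simp
  · have h1 : (0 : Int) ≤ (ps.length : Int) - 1 := by omega
    have hsplit : PySem.List.pyRange 0 (ps.length : Int) 1 =
        PySem.List.pyRange 0 ((ps.length : Int) - 1) 1 ++ [(ps.length : Int) - 1] := by
      have h2 := PySem.List.pyRange_one_succ_right h1 (a := (0 : Int))
      simpa using h2
    rw [hsplit, List.flatMap_append]
    have hlast : PySem.List.slice ps (some (((ps.length : Int) - 1) + 1)) none = [] := by
      rw [PySem.List.slice_from (xs := ps) (a := ((ps.length : Int) - 1) + 1) (by omega)]
      have h3 : (((ps.length : Int) - 1) + 1).toNat = ps.length := by omega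
      rw [h3, List.drop_length]
    simp only [List.flatMap_cons, List.flatMap_nil, List.append_nil]
    rw [hlast]
    simp only [List.map_nil, List.append_nil]
    apply List.flatMap_congr
    intro i hi
    rw [PySem.List.mem_pyRange_one] at hi
    rw [PySem.List.slice_from (xs := ps) (a := i + 1) (by omega)]
    have hmap : (PySem.List.pyRange (i + 1) ((ps.length : Int)) 1).map
        (fun j => PySem.List.pyGetD ps j 0 - PySem.List.pyGetD ps i 0) =
        ((PySem.List.pyRange (i + 1) ((ps.length : Int)) 1).map
          (fun j => PySem.List.pyGetD ps j 0)).map (fun q => q - PySem.List.pyGetD ps i 0) := by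
      rw [List.map_map]
      rfl
    have h4 := PySem.List.map_pyGetD_pyRange (xs := ps) (d := (0 : Int))
      (a := i + 1) (by omega : (0 : Int) ≤ i + 1)
    rw [hmap]
    rw [PySem.List.len_eq] at h4
    rw [h4]

theorem pv_per_ps (ps : List Int) : (pvDA ps).flatMap pvDivSeq = pvDBdiv ps := by
  have h1 : (pvDA ps).flatMap pvDivSeq = (pvDA ps).flatMap pvDivisorsFrom2 :=
    (List.flatMap_congr (fun d _ => (pv_div_eq d).symm))
  rw [h1, pv_dist_eq]
  unfold pvDBdist pvDBdiv
  rw [List.flatMap_assoc]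
  apply List.flatMap_congr
  intro ip _
  rw [pv_flatMap_map]

-- ===== VERDICT (by name: the statement is the Claim_ definition above) =====
theorem find_probable_key_length_spec : Claim_equal_find_probable_key_length := by
  intro rs _
  unfold Spec_find_probable_key_length
  rw [pv_A_eq, pv_B_eq, List.flatMap_assoc]
  congr 1
  exact List.flatMap_congr (fun kv _ => pv_per_ps kv.2)
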